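-- pv_equiv track=rewrite | github.com/seedmaas/SeedModeler-basic | ICML_test_no_optimal.py | update_dict_with_results
-- ===== SOURCE A (Python) =====
-- def update_dict_with_results(dict1, result):
--     """对于答案的parser 确保不会缺省任何一个key"""
--     # 首先，设置所有dict1中的value为空字符串
--     for key in dict1:
--         dict1[key] = ""
--
--     # 标记用于判断是否存在不在dict1中的键
--     all_keys_valid = True
--
--     # 遍历result字典，检查并更新dict1
--     for result_key, value in result.items():
--         # 如果key存在于dict1中，则更新值；否则，设置标记为False并立即结束循环
--         if result_key in dict1:
--             dict1[result_key] = value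
--         else:
--             all_keys_valid = False
--             break
--
--     # 如果发现不在dict1中的键，将dict1所有值重置为空字符串
--     if not all_keys_valid:
--         for key in dict1:
--             dict1[key] = ""
--
--     return dict1
-- ===== SOURCE B (Python) =====
-- def update_dict_with_results(dict1, result):
--     """对于答案的parser 确保不会缺省任何一个key"""
--     # decide first, then write once: mutates dict1 in place like A
--     valid = all(k in dict1 for k in result)
--     for key in dict1:
--         dict1[key] = result[key] if (valid and key in result) else ""
--     return dict1
-- ===== Notes on version B (the rewrite author's own statement) =====
-- stated objective: simpler
-- what changed: A blanks every value, then copies from result until the first invalid key breaks the loop, then re-blanks everything if the flag dropped; B first decides validity with one short-circuiting all() over result's keys and then fills every key in a single write pass (result value if valid and present, else ""), with no reset pass and no break flag.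
import Mathlib
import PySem

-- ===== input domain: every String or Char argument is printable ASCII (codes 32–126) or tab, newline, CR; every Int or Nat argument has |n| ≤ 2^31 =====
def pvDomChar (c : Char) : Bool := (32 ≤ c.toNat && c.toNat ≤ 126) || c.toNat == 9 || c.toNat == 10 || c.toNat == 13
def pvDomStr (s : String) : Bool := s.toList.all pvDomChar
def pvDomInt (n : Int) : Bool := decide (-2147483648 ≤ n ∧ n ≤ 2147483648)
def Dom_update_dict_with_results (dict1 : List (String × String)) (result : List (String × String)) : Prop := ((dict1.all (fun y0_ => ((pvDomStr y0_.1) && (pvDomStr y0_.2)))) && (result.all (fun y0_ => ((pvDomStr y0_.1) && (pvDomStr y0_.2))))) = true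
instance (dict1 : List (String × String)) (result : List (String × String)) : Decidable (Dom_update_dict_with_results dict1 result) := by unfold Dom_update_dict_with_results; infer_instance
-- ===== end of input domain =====

-- B replaces A's blank-all / update-until-break / maybe-reblank passes with decide-then-write
-- (one validity check, one write pass); objective: simpler. Mutation of dict1 in place is
-- preserved by B; the equivalence proved here is about the returned mapping.

-- ===== PORT A =====
-- 'for result_key, value in result.items(): if result_key in dict1: … else: … break'
def pvLoopA (d : PySem.Dict String String) : List (String × String) → PySem.Dict String String × Bool
  | [] => (d, true)
  | (k, v) :: rest => if d.contains k then pvLoopA (d.insert k v) rest else (d, false)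

def update_dict_with_results (dict1 : List (String × String)) (result : List (String × String)) : List (String × String) :=
  let d0 := PySem.Dict.mk dict1
  -- for key in dict1: dict1[key] = ""
  let d1 := d0.keys.foldl (fun acc k => acc.insert k "") d0
  let p := pvLoopA d1 (PySem.Dict.mk result).items
  -- if not all_keys_valid: for key in dict1: dict1[key] = ""
  let d2 := if p.2 then p.1 else p.1.keys.foldl (fun acc k => acc.insert k "") p.1
  d2.items

-- ===== PORT B =====
def update_dict_with_results_alt (dict1 : List (String × String)) (result : List (String × String)) : List (String × String) :=
  let d0 := PySem.Dict.mk dict1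
  let rd := PySem.Dict.mk result
  -- valid = all(k in dict1 for k in result)
  let valid := rd.keys.all (fun k => d0.contains k)
  -- for key in dict1: dict1[key] = result[key] if (valid and key in result) else ""
  -- (result[key] is only read under 'key in result', so (rd.get? k).getD "" is exact here)
  let out := d0.keys.foldl
    (fun acc k => acc.insert k (if valid && rd.contains k then (rd.get? k).getD "" else "")) d0
  out.items

-- ===== PRECONDITION & SPEC =====
-- Pre_ excludes only association lists with duplicate keys: those do not represent Python
-- dicts (the Python function's arguments are dicts, whose keys are necessarily distinct),
-- so no input the Python A accepts is excluded.
def Pre_update_dict_with_results (dict1 : List (String × String)) (result : List (String × String)) : Prop :=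
  (dict1.map Prod.fst).Nodup ∧ (result.map Prod.fst).Nodup
instance (dict1 : List (String × String)) (result : List (String × String)) : Decidable (Pre_update_dict_with_results dict1 result) := by unfold Pre_update_dict_with_results; infer_instance

def pvWitness_update_dict_with_results : (List (String × String)) × (List (String × String)) :=
  ([("a", "1"), ("b", "2")], [("a", "x")])

def Spec_update_dict_with_results (dict1 : List (String × String)) (result : List (String × String)) (out : List (String × String)) : Prop := out = update_dict_with_results_alt dict1 result
instance (dict1 : List (String × String)) (result : List (String × String)) (out : List (String × String)) : Decidable (Spec_update_dict_with_results dict1 result out) := by unfold Spec_update_dict_with_results; infer_instance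

-- ===== CLAIM (what is proved, stated in full; the proofs are below) =====
def Claim_equal_update_dict_with_results : Prop := ∀ (dict1 : List (String × String)) (result : List (String × String)), Dom_update_dict_with_results dict1 result → Pre_update_dict_with_results dict1 result → Spec_update_dict_with_results dict1 result (update_dict_with_results dict1 result)

-- ===== LEMMAS AND PROOFS =====

-- a fold of inserts whose value depends only on the key
theorem pv_get?_foldl_insert (f : String → String) (l : List String)
    (d : PySem.Dict String String) (x : String) :
    (l.foldl (fun acc k => acc.insert k (f k)) d).get? x
      = if x ∈ l then some (f x) else d.get? x := by
  induction l generalizing d with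
  | nil => simp
  | cons k rest ih =>
    simp only [List.foldl_cons, ih, List.mem_cons]
    by_cases hx : x ∈ rest
    · simp [hx]
    · by_cases hk : x = k
      · simp [hk, PySem.Dict.get?_insert_self]
      · simp [hx, hk, PySem.Dict.get?_insert_of_ne _ _ hk]

theorem pv_keys_foldl_insert_mem (f : String → String) (l : List String)
    (d : PySem.Dict String String) (h : ∀ k ∈ l, d.contains k = true) :
    (l.foldl (fun acc k => acc.insert k (f k)) d).keys = d.keys := by
  induction l generalizing d with
  | nil => rfl
  | cons k rest ih =>
    have hk : d.contains k = true := h k (List.mem_cons_self ..)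
    simp only [List.foldl_cons]
    rw [ih _ (fun k' hk' => by
      rw [PySem.Dict.contains_insert]; simp [h k' (List.mem_cons_of_mem _ hk')]),
      PySem.Dict.keys_insert_of_contains _ _ hk]

theorem pv_loopA_keys (rs : List (String × String)) (d : PySem.Dict String String) :
    (pvLoopA d rs).1.keys = d.keys := by
  induction rs generalizing d with
  | nil => rfl
  | cons p rest ih =>
    obtain ⟨k, v⟩ := p
    by_cases hk : d.contains k = true
    · simp only [pvLoopA, hk, if_true]
      rw [ih, PySem.Dict.keys_insert_of_contains _ _ hk]
    · simp [pvLoopA, hk]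

theorem pv_loopA_snd (rs : List (String × String)) (d : PySem.Dict String String) :
    (pvLoopA d rs).2 = rs.all (fun p => d.contains p.1) := by
  induction rs generalizing d with
  | nil => simp [pvLoopA]
  | cons p rest ih =>
    obtain ⟨k, v⟩ := p
    by_cases hk : d.contains k = true
    · simp only [pvLoopA, hk, if_true, List.all_cons, Bool.true_and]
      rw [ih]
      refine List.all_congr rfl (fun q => ?_)
      rw [PySem.Dict.contains_insert]
      by_cases hq : q.1 = k
      · simp [hq, hk]
      · simp [hq]
    · simp [pvLoopA, hk]

theorem pv_loopA_get? (rs : List (String × String)) (d : PySem.Dict String String)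
    (hnd : (rs.map Prod.fst).Nodup) (hall : ∀ p ∈ rs, d.contains p.1 = true) (x : String) :
    (pvLoopA d rs).1.get? x = ((PySem.Dict.mk rs).get? x).or (d.get? x) := by
  induction rs generalizing d with
  | nil => simp [pvLoopA, PySem.Dict.get?]
  | cons p rest ih =>
    obtain ⟨k, v⟩ := p
    have hk : d.contains k = true := hall (k, v) (List.mem_cons_self ..)
    simp only [pvLoopA, hk, if_true]
    have hrest : ∀ q ∈ rest, (d.insert k v).contains q.1 = true := by
      intro q hq
      rw [PySem.Dict.contains_insert]
      simp [hall q (List.mem_cons_of_mem _ hq)]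
    rw [ih (d.insert k v) (by simpa using hnd.of_cons) hrest,
        PySem.Dict.get?_mk_cons]
    by_cases hx : k = x
    · subst hx
      have h2 := hnd
      rw [List.map_cons, List.nodup_cons] at h2
      have : (PySem.Dict.mk rest).get? k = none := by
        rw [PySem.Dict.get?_eq_none_iff_not_mem_keys]
        simpa [PySem.Dict.keys] using h2.1
      simp [this, PySem.Dict.get?_insert_self]
    · simp [hx, PySem.Dict.get?_insert_of_ne _ _ (fun h => hx h.symm)]

theorem pv_main (dict1 result : List (String × String))
    (hd : (dict1.map Prod.fst).Nodup) (hr : (result.map Prod.fst).Nodup) :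
    update_dict_with_results dict1 result = update_dict_with_results_alt dict1 result := by
  unfold update_dict_with_results update_dict_with_results_alt
  dsimp only
  set d0 : PySem.Dict String String := PySem.Dict.mk dict1 with hd0
  set rd : PySem.Dict String String := PySem.Dict.mk result with hrd
  have hk0 : d0.keys = dict1.map Prod.fst := by simp [hd0, PySem.Dict.keys]
  have hnd0 : d0.keys.Nodup := hk0 ▸ hd
  have hitems : rd.items = result := rfl
  set d1 : PySem.Dict String String :=
    d0.keys.foldl (fun acc k => acc.insert k "") d0 with hd1
  have h1keys : d1.keys = d0.keys :=
    pv_keys_foldl_insert_mem (fun _ => "") d0.keys d0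
      (fun k hk => (PySem.Dict.contains_iff_mem_keys d0 k).mpr hk)
  have hc1 : ∀ x, d1.contains x = d0.contains x := by
    intro x
    rw [PySem.Dict.contains_eq_decide_mem_keys, PySem.Dict.contains_eq_decide_mem_keys, h1keys]
  have h1get : ∀ x, d1.get? x = if x ∈ d0.keys then some "" else d0.get? x := fun x =>
    pv_get?_foldl_insert (fun _ => "") d0.keys d0 x
  -- B's validity test coincides with the predicate A's loop flag computes
  have hvalid : (rd.keys.all fun k => d0.contains k) = result.all (fun p => d0.contains p.1) := by
    simp only [hrd, PySem.Dict.keys, List.all_map]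
    exact List.all_congr rfl (fun p => rfl)
  have hflag : (pvLoopA d1 rd.items).2 = result.all (fun p => d0.contains p.1) := by
    rw [pv_loopA_snd, hitems]
    exact List.all_congr rfl (fun p => hc1 p.1)
  by_cases hv : result.all (fun p => d0.contains p.1) = true
  · -- all of result's keys are present: A keeps the copied values, B writes them directly
    rw [hflag, hv, if_pos rfl]
    have hall : ∀ p ∈ result, d1.contains p.1 = true := fun p hp => by
      rw [hc1]; exact (List.all_eq_true.mp hv) p hp
    have hAkeys : (pvLoopA d1 rd.items).1.keys = d0.keys := by
      rw [pv_loopA_keys, h1keys]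
    have hAget : ∀ x, (pvLoopA d1 rd.items).1.get? x = (rd.get? x).or (d1.get? x) := by
      intro x; rw [hitems]; exact pv_loopA_get? result d1 hr hall x
    have hBkeys :
        (d0.keys.foldl (fun acc k => acc.insert k
          (if (rd.keys.all fun k => d0.contains k) && rd.contains k then (rd.get? k).getD "" else "")) d0).keys
          = d0.keys :=
      pv_keys_foldl_insert_mem _ d0.keys d0
        (fun k hk => (PySem.Dict.contains_iff_mem_keys d0 k).mpr hk)
    rw [PySem.Dict.items_eq_map_keys _ (by rw [hAkeys]; exact hnd0) "",
        PySem.Dict.items_eq_map_keys _ (by rw [hBkeys]; exact hnd0) "", hAkeys, hBkeys]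
    refine List.map_congr_left (fun k hk => ?_)
    rw [PySem.Dict.getD_eq_get?_getD, PySem.Dict.getD_eq_get?_getD, hAget,
        pv_get?_foldl_insert (fun _ => "") d0.keys d0 k, if_pos hk,
        pv_get?_foldl_insert _ d0.keys d0 k, if_pos hk, hvalid, hv]
    cases hg : rd.get? k with
    | none =>
      have : rd.contains k = false := by
        rw [PySem.Dict.contains_eq_isSome_get?, hg]; rfl
      simp [this]
    | some v =>
      have : rd.contains k = true := by
        rw [PySem.Dict.contains_eq_isSome_get?, hg]; rfl
      simp [this]
  · -- some key of result is missing: A re-blanks everything, B writes "" everywhere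
    rw [hflag, if_neg (by simpa using hv)]
    have hLkeys : (pvLoopA d1 rd.items).1.keys = d0.keys := by
      rw [pv_loopA_keys, h1keys]
    have hAkeys :
        ((pvLoopA d1 rd.items).1.keys.foldl (fun acc k => acc.insert k "") (pvLoopA d1 rd.items).1).keys
          = d0.keys := by
      rw [pv_keys_foldl_insert_mem (fun _ => "") _ _
        (fun k hk => (PySem.Dict.contains_iff_mem_keys ..).mpr hk), hLkeys]
    have hBkeys :
        (d0.keys.foldl (fun acc k => acc.insert k
          (if (rd.keys.all fun k => d0.contains k) && rd.contains k then (rd.get? k).getD "" else "")) d0).keys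
          = d0.keys :=
      pv_keys_foldl_insert_mem _ d0.keys d0
        (fun k hk => (PySem.Dict.contains_iff_mem_keys d0 k).mpr hk)
    have hv' : result.all (fun p => d0.contains p.1) = false := by simpa using hv
    rw [PySem.Dict.items_eq_map_keys _ (by rw [hAkeys]; exact hnd0) "",
        PySem.Dict.items_eq_map_keys _ (by rw [hBkeys]; exact hnd0) "", hAkeys, hBkeys]
    refine List.map_congr_left (fun k hk => ?_)
    rw [PySem.Dict.getD_eq_get?_getD, PySem.Dict.getD_eq_get?_getD,
        pv_get?_foldl_insert (fun _ => "") _ _ k, if_pos (by rw [hLkeys]; exact hk),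
        pv_get?_foldl_insert _ d0.keys d0 k, if_pos hk, hvalid, hv']
    simp

-- ===== VERDICT (by name: the statement is the Claim_ definition above) =====
theorem update_dict_with_results_spec : Claim_equal_update_dict_with_results := by
  intro dict1 result _hdom hpre
  unfold Spec_update_dict_with_results
  exact pv_main dict1 result hpre.1 hpre.2
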